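-- pv_equiv track=rewrite | github.com/powersj/perfkit | ec2_list.py | _determine_owner
-- ===== SOURCE A (Python) =====
-- def _determine_owner(tags):
--     """Determine owner of the instance based on tags."""
--     if not tags:
--         return ''
--
--     owner = ''
--     for tag in tags:
--         if tag['Key'] == 'Owner':
--             owner = tag['Value']
--
--     return owner
-- ===== SOURCE B (Python) =====
-- def _determine_owner(tags):
--     """Determine owner of the instance based on tags."""
--     if not tags:
--         return ''
--     for tag in reversed(tags):
--         if tag['Key'] == 'Owner':
--             return tag['Value']
--     return ''
-- ===== Notes on version B (the rewrite author's own statement) =====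
-- stated objective: alternative
-- what changed: B scans the tag list back-to-front and returns early at the first match (the last 'Owner' tag), instead of A's full forward pass that keeps overwriting an accumulator.
import Mathlib
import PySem

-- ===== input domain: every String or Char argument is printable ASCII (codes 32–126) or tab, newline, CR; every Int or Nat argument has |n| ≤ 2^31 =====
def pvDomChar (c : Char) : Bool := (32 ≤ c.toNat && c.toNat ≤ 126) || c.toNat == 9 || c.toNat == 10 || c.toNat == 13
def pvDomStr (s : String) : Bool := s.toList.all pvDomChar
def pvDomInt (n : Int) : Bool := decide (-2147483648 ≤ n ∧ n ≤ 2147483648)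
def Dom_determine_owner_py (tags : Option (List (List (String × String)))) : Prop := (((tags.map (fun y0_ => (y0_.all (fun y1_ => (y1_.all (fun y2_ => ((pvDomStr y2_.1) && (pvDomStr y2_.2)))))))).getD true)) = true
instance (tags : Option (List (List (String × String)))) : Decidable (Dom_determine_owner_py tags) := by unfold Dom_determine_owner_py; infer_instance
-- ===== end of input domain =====

-- B scans the tag list back-to-front with an early return at the first 'Owner' tag,
-- instead of A's full forward pass overwriting an accumulator; return values agree.

-- ===== PORT A =====
def determine_owner_py (tags : Option (List (List (String × String)))) : String :=
  match tags with
  | none => ""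
  | some l =>
    if l.isEmpty then ""
    else
      -- for tag in tags: if tag['Key'] == 'Owner': owner = tag['Value']
      l.foldl (fun owner tag =>
        if ((PySem.Dict.mk tag).get? "Key").getD "" == "Owner" then
          ((PySem.Dict.mk tag).get? "Value").getD ""
        else owner) ""

-- ===== PORT B =====
-- for tag in reversed(tags): if tag['Key'] == 'Owner': return tag['Value']
def determine_owner_go : List (List (String × String)) → String
  | [] => ""
  | tag :: rest =>
    if ((PySem.Dict.mk tag).get? "Key").getD "" == "Owner" then
      ((PySem.Dict.mk tag).get? "Value").getD ""
    else determine_owner_go rest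

def determine_owner_py_alt (tags : Option (List (List (String × String)))) : String :=
  match tags with
  | none => ""
  | some l => if l.isEmpty then "" else determine_owner_go l.reverse

-- ===== PRECONDITION & SPEC =====
-- Pre_ excludes exactly the inputs where Python A raises KeyError: a tag dict
-- without a 'Key' entry, or an 'Owner' tag without a 'Value' entry.
def Pre_determine_owner_py (tags : Option (List (List (String × String)))) : Prop :=
  ∀ tag ∈ tags.getD [],
    (PySem.Dict.mk tag).get? "Key" ≠ none ∧
    ((PySem.Dict.mk tag).get? "Key" = some "Owner" → (PySem.Dict.mk tag).get? "Value" ≠ none)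
instance (tags : Option (List (List (String × String)))) : Decidable (Pre_determine_owner_py tags) := by unfold Pre_determine_owner_py; infer_instance

def pvWitness_determine_owner_py : (Option (List (List (String × String)))) :=
  some [[("Key", "Owner"), ("Value", "alice")], [("Key", "Name"), ("Value", "vm1")]]

def Spec_determine_owner_py (tags : Option (List (List (String × String)))) (out : String) : Prop := out = determine_owner_py_alt tags
instance (tags : Option (List (List (String × String)))) (out : String) : Decidable (Spec_determine_owner_py tags out) := by unfold Spec_determine_owner_py; infer_instance

-- ===== CLAIM (what is proved, stated in full; the proofs are below) =====
def Claim_equal_determine_owner_py : Prop := ∀ (tags : Option (List (List (String × String)))), Dom_determine_owner_py tags → Pre_determine_owner_py tags → Spec_determine_owner_py tags (determine_owner_py tags)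

-- ===== LEMMAS AND PROOFS =====
theorem foldl_eq_go_reverse (l : List (List (String × String))) :
    l.foldl (fun owner tag =>
        if ((PySem.Dict.mk tag).get? "Key").getD "" == "Owner" then
          ((PySem.Dict.mk tag).get? "Value").getD ""
        else owner) ""
      = determine_owner_go l.reverse := by
  induction l using List.reverseRecOn with
  | nil => rfl
  | append_singleton l t ih =>
    rw [List.foldl_append, List.reverse_append, List.reverse_singleton, List.singleton_append]
    simp only [List.foldl_cons, List.foldl_nil, determine_owner_go]
    split_ifs with h
    · rfl
    · exact ih

-- ===== VERDICT (by name: the statement is the Claim_ definition above) =====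
theorem determine_owner_py_spec : Claim_equal_determine_owner_py := by
  intro tags _ _
  cases tags with
  | none => rfl
  | some l =>
    simp only [Spec_determine_owner_py, determine_owner_py, determine_owner_py_alt]
    by_cases h : l.isEmpty = true
    · rw [if_pos h, if_pos h]
    · rw [if_neg h, if_neg h]; exact foldl_eq_go_reverse l
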